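-- pv_equiv track=rewrite | github.com/hqucms/weaver-core | performance/plot_roc.py | find_matching_suffix_pairs
-- ===== SOURCE A (Python) =====
-- def find_matching_suffix_pairs(d):
--     matching_pairs = []
--     keys = list(d.keys())
--     for i in range(len(keys)):
--         for j in range(i+1, len(keys)):
--             prefix_i = keys[i].replace('_mask', '').replace('_weights', '')
--             prefix_j = keys[j].replace('_mask', '').replace('_weights', '')
--             if ('_mask' in keys[i] and '_mask' not in keys[j]) or \
--                 ('_mask' not in keys[i] and '_mask' in keys[j]):
--                 continue
--             suffix_i = prefix_i.split('_')[-1]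
--             suffix_j = prefix_j.split('_')[-1]
--             if suffix_i == suffix_j:
--                 matching_pairs.append((keys[i], keys[j], suffix_i))
--     return matching_pairs
-- ===== SOURCE B (Python) =====
-- def find_matching_suffix_pairs(d):
--     def suffix(k):
--         return k.replace('_mask', '').replace('_weights', '').split('_')[-1]
--
--     def sig(k):
--         return ('_mask' in k, suffix(k))
--
--     buckets = {}
--     for k in d.keys():
--         s = sig(k)
--         buckets[s] = buckets.get(s, []) + [k]
--     matching_pairs = []
--     for k in d.keys():
--         s = sig(k)
--         rest = buckets.get(s, [])[1:]
--         buckets[s] = rest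
--         for m in rest:
--             matching_pairs.append((k, m, s[1]))
--     return matching_pairs
-- ===== Notes on version B (the rewrite author's own statement) =====
-- stated objective: faster
-- what changed: Instead of comparing every pair of keys (recomputing the mask/suffix signature per comparison), B computes each key's (has-mask, suffix) signature once, groups keys into buckets keyed by that signature, and emits each key's pairs with the later members of its own bucket, yielding exactly A's (i,j)-ordered output.
import Mathlib
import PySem

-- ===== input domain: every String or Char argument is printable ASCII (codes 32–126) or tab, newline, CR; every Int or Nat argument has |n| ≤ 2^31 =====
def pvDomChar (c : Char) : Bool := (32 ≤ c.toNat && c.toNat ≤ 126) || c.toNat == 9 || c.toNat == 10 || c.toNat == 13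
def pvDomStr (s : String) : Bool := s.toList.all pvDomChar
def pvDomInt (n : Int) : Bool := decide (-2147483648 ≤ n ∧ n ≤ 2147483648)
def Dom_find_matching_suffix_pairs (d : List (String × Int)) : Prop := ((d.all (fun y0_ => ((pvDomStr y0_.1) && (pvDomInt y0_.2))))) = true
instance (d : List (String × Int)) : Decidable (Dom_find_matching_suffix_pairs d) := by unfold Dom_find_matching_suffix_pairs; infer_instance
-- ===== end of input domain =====

-- B buckets the keys by their (has-mask, suffix) signature computed once per key and emits
-- intra-bucket pairs in original order, instead of A's all-pairs scan with per-pair recomputation.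

-- ===== PORT A =====
def find_matching_suffix_pairs (d : List (String × Int)) : List (String × String × String) :=
  let keys := (PySem.Dict.ofList d).keys
  (PySem.List.pyRange 0 keys.length 1).foldl (fun acc i =>
    (PySem.List.pyRange (i + 1) keys.length 1).foldl (fun acc j =>
      let ki := PySem.List.pyGetD keys i ""
      let kj := PySem.List.pyGetD keys j ""
      let prefix_i := PySem.Str.replace (PySem.Str.replace ki "_mask" "") "_weights" ""
      let prefix_j := PySem.Str.replace (PySem.Str.replace kj "_mask" "") "_weights" ""
      if (PySem.Str.isIn "_mask" ki && !PySem.Str.isIn "_mask" kj) ||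
         (!PySem.Str.isIn "_mask" ki && PySem.Str.isIn "_mask" kj) then acc
      else
        let suffix_i := PySem.List.pyGetD ((PySem.Str.split? prefix_i "_").getD []) (-1) ""
        let suffix_j := PySem.List.pyGetD ((PySem.Str.split? prefix_j "_").getD []) (-1) ""
        if suffix_i == suffix_j then acc ++ [(ki, kj, suffix_i)] else acc) acc) []

-- ===== PORT B =====
-- suffix(k) from Source B: last '_'-part of the key with '_mask'/'_weights' removed
def pvSuffix (k : String) : String :=
  PySem.List.pyGetD ((PySem.Str.split? (PySem.Str.replace (PySem.Str.replace k "_mask" "") "_weights" "") "_").getD []) (-1) ""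

-- sig(k) from Source B
def pvSig (k : String) : Bool × String := (PySem.Str.isIn "_mask" k, pvSuffix k)

def find_matching_suffix_pairs_alt (d : List (String × Int)) : List (String × String × String) :=
  let keys := (PySem.Dict.ofList d).keys
  let buckets : PySem.Dict (Bool × String) (List String) :=
    keys.foldl (fun b k => b.modify (pvSig k) [] (· ++ [k])) PySem.Dict.empty
  (keys.foldl
    (fun (st : PySem.Dict (Bool × String) (List String) × List (String × String × String)) k =>
      (st.1.insert (pvSig k) ((st.1.getD (pvSig k) []).tail),
       st.2 ++ ((st.1.getD (pvSig k) []).tail).map (fun m => (k, m, (pvSig k).2))))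
    (buckets, [])).2

-- ===== PRECONDITION & SPEC =====
def Spec_find_matching_suffix_pairs (d : List (String × Int)) (out : List (String × String × String)) : Prop := out = find_matching_suffix_pairs_alt d
instance (d : List (String × Int)) (out : List (String × String × String)) : Decidable (Spec_find_matching_suffix_pairs d out) := by unfold Spec_find_matching_suffix_pairs; infer_instance

-- ===== CLAIM (what is proved, stated in full; the proofs are below) =====
def Claim_equal_find_matching_suffix_pairs : Prop := ∀ (d : List (String × Int)), Dom_find_matching_suffix_pairs d → Spec_find_matching_suffix_pairs d (find_matching_suffix_pairs d)

-- ===== LEMMAS AND PROOFS =====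

-- the common value of both programs, expressed structurally on the key list
def pvPairs : List String → List (String × String × String)
  | [] => []
  | k :: ks =>
      (ks.filter (fun m => pvSig m == pvSig k)).map (fun m => (k, m, (pvSig k).2)) ++ pvPairs ks

-- A's pair body (mask-status test, then suffix test) emits exactly when the signatures agree
theorem pvBodyA (ki kj : String) (acc : List (String × String × String)) :
    (if (PySem.Str.isIn "_mask" ki && !PySem.Str.isIn "_mask" kj) ||
        (!PySem.Str.isIn "_mask" ki && PySem.Str.isIn "_mask" kj) then acc
     else
       if PySem.List.pyGetD ((PySem.Str.split? (PySem.Str.replace (PySem.Str.replace ki "_mask" "") "_weights" "") "_").getD []) (-1) "" ==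
          PySem.List.pyGetD ((PySem.Str.split? (PySem.Str.replace (PySem.Str.replace kj "_mask" "") "_weights" "") "_").getD []) (-1) "" then
         acc ++ [(ki, kj, PySem.List.pyGetD ((PySem.Str.split? (PySem.Str.replace (PySem.Str.replace ki "_mask" "") "_weights" "") "_").getD []) (-1) "")]
       else acc)
    = if pvSig kj == pvSig ki then acc ++ [(ki, kj, (pvSig ki).2)] else acc := by
  have hs : ∀ k, PySem.List.pyGetD ((PySem.Str.split? (PySem.Str.replace (PySem.Str.replace k "_mask" "") "_weights" "") "_").getD []) (-1) "" = pvSuffix k :=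
    fun _ => rfl
  have hp : ∀ (a b : Bool) (x y : String), ((a, x) == (b, y)) = (a == b && x == y) :=
    fun _ _ _ _ => rfl
  have hu : ∀ k, pvSig k = (PySem.Str.isIn "_mask" k, pvSuffix k) := fun _ => rfl
  rw [hs ki, hs kj, hu ki, hu kj, hp]
  dsimp only
  cases hi : PySem.Str.isIn "_mask" ki <;> cases hj : PySem.Str.isIn "_mask" kj <;>
    by_cases h : pvSuffix ki = pvSuffix kj <;> simp [hi, hj, h] <;>
    exact fun hh => h hh.symm

-- A's inner loop: scanning indices b.. of the key list collects this row's matches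
theorem pvInnerA (keys : List String) (ki : String) : ∀ (n : Nat) (b : Int), 0 ≤ b →
    keys.length - b.toNat = n → ∀ (acc : List (String × String × String)),
    (PySem.List.pyRange b keys.length 1).foldl (fun acc j =>
      if (PySem.Str.isIn "_mask" ki && !PySem.Str.isIn "_mask" (PySem.List.pyGetD keys j "")) ||
         (!PySem.Str.isIn "_mask" ki && PySem.Str.isIn "_mask" (PySem.List.pyGetD keys j "")) then acc
      else
        if PySem.List.pyGetD ((PySem.Str.split? (PySem.Str.replace (PySem.Str.replace ki "_mask" "") "_weights" "") "_").getD []) (-1) "" ==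
           PySem.List.pyGetD ((PySem.Str.split? (PySem.Str.replace (PySem.Str.replace (PySem.List.pyGetD keys j "") "_mask" "") "_weights" "") "_").getD []) (-1) "" then
          acc ++ [(ki, PySem.List.pyGetD keys j "", PySem.List.pyGetD ((PySem.Str.split? (PySem.Str.replace (PySem.Str.replace ki "_mask" "") "_weights" "") "_").getD []) (-1) "")]
        else acc) acc
    = acc ++ ((keys.drop b.toNat).filter (fun m => pvSig m == pvSig ki)).map (fun m => (ki, m, (pvSig ki).2)) := by
  intro n
  induction n with
  | zero =>
    intro b h0 hn acc
    rw [PySem.List.pyRange_one_eq_nil (by omega), List.drop_eq_nil_of_le (by omega)]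
    simp
  | succ n ih =>
    intro b h0 hn acc
    have hlt : b < (keys.length : Int) := by omega
    have hltn : b.toNat < keys.length := by omega
    rw [PySem.List.pyRange_one_cons hlt, List.foldl_cons, pvBodyA,
      PySem.List.pyGetD_eq_getElem keys "" h0 hlt,
      ih (b + 1) (by omega) (by omega),
      List.drop_eq_getElem_cons hltn]
    have h1 : (b + 1).toNat = b.toNat + 1 := by omega
    rw [h1, List.filter_cons]
    by_cases h : (pvSig keys[b.toNat] == pvSig ki) = true <;> simp [h]

-- A's outer index loop equals pvPairs on the corresponding suffix of the key list
theorem pvOuterA (keys : List String) : ∀ (n : Nat) (a : Int), 0 ≤ a →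
    keys.length - a.toNat = n → ∀ (acc : List (String × String × String)),
    (PySem.List.pyRange a keys.length 1).foldl (fun acc i =>
      (PySem.List.pyRange (i + 1) keys.length 1).foldl (fun acc j =>
        if (PySem.Str.isIn "_mask" (PySem.List.pyGetD keys i "") && !PySem.Str.isIn "_mask" (PySem.List.pyGetD keys j "")) ||
           (!PySem.Str.isIn "_mask" (PySem.List.pyGetD keys i "") && PySem.Str.isIn "_mask" (PySem.List.pyGetD keys j "")) then acc
        else
          if PySem.List.pyGetD ((PySem.Str.split? (PySem.Str.replace (PySem.Str.replace (PySem.List.pyGetD keys i "") "_mask" "") "_weights" "") "_").getD []) (-1) "" ==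
             PySem.List.pyGetD ((PySem.Str.split? (PySem.Str.replace (PySem.Str.replace (PySem.List.pyGetD keys j "") "_mask" "") "_weights" "") "_").getD []) (-1) "" then
            acc ++ [(PySem.List.pyGetD keys i "", PySem.List.pyGetD keys j "", PySem.List.pyGetD ((PySem.Str.split? (PySem.Str.replace (PySem.Str.replace (PySem.List.pyGetD keys i "") "_mask" "") "_weights" "") "_").getD []) (-1) "")]
          else acc) acc) acc
    = acc ++ pvPairs (keys.drop a.toNat) := by
  intro n
  induction n with
  | zero =>
    intro a h0 hn acc
    rw [PySem.List.pyRange_one_eq_nil (by omega), List.drop_eq_nil_of_le (by omega)]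
    simp [pvPairs]
  | succ n ih =>
    intro a h0 hn acc
    have hlt : a < (keys.length : Int) := by omega
    have hltn : a.toNat < keys.length := by omega
    rw [PySem.List.pyRange_one_cons hlt, List.foldl_cons,
      pvInnerA keys _ (keys.length - (a + 1).toNat) (a + 1) (by omega) rfl,
      ih (a + 1) (by omega) (by omega),
      List.drop_eq_getElem_cons hltn,
      PySem.List.pyGetD_eq_getElem keys "" h0 hlt]
    have h1 : (a + 1).toNat = a.toNat + 1 := by omega
    rw [h1]
    simp [pvPairs]

-- B's bucket-building fold, rephrased as a fold over (signature, key) pairs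
theorem pvBucketsFold (keys : List String) (d : PySem.Dict (Bool × String) (List String)) :
    keys.foldl (fun b k => b.modify (pvSig k) [] (· ++ [k])) d
    = (keys.map (fun k => (pvSig k, k))).foldl (fun b p => b.modify p.1 [] (· ++ [p.2])) d := by
  induction keys generalizing d with
  | nil => rfl
  | cons x t ih => simp [List.foldl_cons, ih]

-- B's bucket dict maps each signature to exactly the keys carrying it, in order
theorem pvBuckets (keys : List String) (s : Bool × String) :
    (keys.foldl (fun b k => b.modify (pvSig k) [] (· ++ [k])) PySem.Dict.empty).getD s []
    = keys.filter (fun k => pvSig k == s) := by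
  rw [pvBucketsFold, PySem.Dict.getD_foldl_modify_append]
  simp [List.filter_map, Function.comp_def]

-- B's emit loop under the bucket invariant
theorem pvEmitB (r : List String) (b : PySem.Dict (Bool × String) (List String))
    (out : List (String × String × String))
    (h : ∀ s, b.getD s [] = r.filter (fun k => pvSig k == s)) :
    (r.foldl
      (fun (st : PySem.Dict (Bool × String) (List String) × List (String × String × String)) k =>
        (st.1.insert (pvSig k) ((st.1.getD (pvSig k) []).tail),
         st.2 ++ ((st.1.getD (pvSig k) []).tail).map (fun m => (k, m, (pvSig k).2))))
      (b, out)).2 = out ++ pvPairs r := by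
  induction r generalizing b out with
  | nil => simp [pvPairs]
  | cons k t ih =>
    simp only [List.foldl_cons]
    have hb : b.getD (pvSig k) [] = k :: t.filter (fun m => pvSig m == pvSig k) := by
      rw [h (pvSig k)]; simp
    rw [ih]
    · rw [hb]
      simp [pvPairs]
    · intro s
      by_cases hs : s = pvSig k
      · subst hs
        rw [PySem.Dict.getD_insert_self, hb]
        simp
      · rw [PySem.Dict.getD_insert_of_ne _ _ _ hs, h s]
        have hne : (pvSig k == s) = false := by
          simp only [beq_eq_false_iff_ne]
          exact fun hh => hs hh.symm
        simp [hne]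

-- ===== VERDICT (by name: the statement is the Claim_ definition above) =====
theorem find_matching_suffix_pairs_spec : Claim_equal_find_matching_suffix_pairs := by
  intro d _
  unfold Spec_find_matching_suffix_pairs
  simp only [find_matching_suffix_pairs, find_matching_suffix_pairs_alt]
  rw [pvOuterA ((PySem.Dict.ofList d).keys) ((PySem.Dict.ofList d).keys.length) 0 (by omega)
      (by simp),
    pvEmitB ((PySem.Dict.ofList d).keys) _ [] (fun s => pvBuckets _ s)]
  simp
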